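-- pv_equiv track=rewrite | github.com/Leapense/problems | 9518번： 로마 카톨릭 미사/로마 카톨릭 미사.py | count_handshakes
-- ===== SOURCE A (Python) =====
-- def count_handshakes(arr, R, S):
--     directions = [(-1, -1), (-1, 0), (-1, 1),
--                   (0, -1),           (0, 1),
--                   (1, -1), (1, 0), (1, 1)]
--     handshake = 0
--
--     for r in range(R):
--         for c in range(S):
--             if arr[r][c] == 'o':
--                 for dr, dc in directions:
--                     nr, nc = r + dr, c + dc
--                     if 0 <= nr < R and 0 <= nc < S and arr[nr][nc] == 'o':
--                         handshake += 1
--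
--     handshake //= 2
--     return handshake
-- ===== SOURCE B (Python) =====
-- def count_handshakes(arr, R, S):
--     grid = [row[:max(0, S)] for row in arr[:max(0, R)]]
--     horiz = sum(a == 'o' and b == 'o' for row in grid for a, b in zip(row, row[1:]))
--     vert = sum(a == 'o' and b == 'o' for r1, r2 in zip(grid, grid[1:]) for a, b in zip(r1, r2))
--     diag = sum(a == 'o' and b == 'o' for r1, r2 in zip(grid, grid[1:]) for a, b in zip(r1, r2[1:]))
--     anti = sum(a == 'o' and b == 'o' for r1, r2 in zip(grid, grid[1:]) for a, b in zip(r1[1:], r2))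
--     return horiz + vert + diag + anti
-- ===== Notes on version B (the rewrite author's own statement) =====
-- stated objective: alternative
-- what changed: Instead of probing all 8 neighbours of every 'o' cell and halving the total, B slices the R-by-S grid out of the array and counts each adjacent pair exactly once with four directional line scans (zip of each row with its shift, and zip of consecutive rows with shifts) and returns their sum with no division.
import Mathlib
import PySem

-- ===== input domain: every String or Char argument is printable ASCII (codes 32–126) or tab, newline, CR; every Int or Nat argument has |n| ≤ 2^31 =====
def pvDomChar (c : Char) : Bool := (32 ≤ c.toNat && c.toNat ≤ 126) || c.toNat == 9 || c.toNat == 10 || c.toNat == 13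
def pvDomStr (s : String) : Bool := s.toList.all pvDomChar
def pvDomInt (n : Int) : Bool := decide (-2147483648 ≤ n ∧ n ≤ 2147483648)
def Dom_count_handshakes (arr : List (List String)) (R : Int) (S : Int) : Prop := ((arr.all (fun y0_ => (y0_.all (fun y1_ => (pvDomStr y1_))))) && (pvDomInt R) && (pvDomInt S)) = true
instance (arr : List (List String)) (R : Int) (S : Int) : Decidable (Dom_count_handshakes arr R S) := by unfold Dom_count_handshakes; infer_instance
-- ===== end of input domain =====

-- B replaces A's per-cell 8-neighbour probe plus halving by four directional line
-- scans that count each adjacent pair exactly once and need no division (objective: alternative).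

-- ===== PORT A =====
def count_handshakes (arr : List (List String)) (R : Int) (S : Int) : Int :=
  let directions : List (Int × Int) :=
    [(-1,-1),(-1,0),(-1,1),(0,-1),(0,1),(1,-1),(1,0),(1,1)]
  let handshake : Int :=
    (PySem.List.pyRange 0 R 1).foldl (fun h r =>
      (PySem.List.pyRange 0 S 1).foldl (fun h c =>
        if PySem.List.pyGetD (PySem.List.pyGetD arr r []) c "" == "o" then
          directions.foldl (fun h dd =>
            let nr := r + dd.1
            let nc := c + dd.2
            if (0 ≤ nr ∧ nr < R ∧ 0 ≤ nc ∧ nc < S) ∧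
               PySem.List.pyGetD (PySem.List.pyGetD arr nr []) nc "" == "o"
            then h + 1 else h) h
        else h) h) 0
  PySem.Int.floordiv handshake 2

-- ===== PORT B =====
def count_handshakes_alt (arr : List (List String)) (R : Int) (S : Int) : Int :=
  let grid : List (List String) :=
    (PySem.List.slice arr none (some (max 0 R))).map
      (fun row => PySem.List.slice row none (some (max 0 S)))
  let horiz : Int :=
    (grid.map (fun row =>
      ((row.zip (PySem.List.slice row (some 1) none)).map
        (fun p => if p.1 == "o" && p.2 == "o" then (1:Int) else 0)).sum)).sum
  let vert : Int :=
    ((grid.zip (PySem.List.slice grid (some 1) none)).map (fun rr =>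
      ((rr.1.zip rr.2).map
        (fun p => if p.1 == "o" && p.2 == "o" then (1:Int) else 0)).sum)).sum
  let diag : Int :=
    ((grid.zip (PySem.List.slice grid (some 1) none)).map (fun rr =>
      ((rr.1.zip (PySem.List.slice rr.2 (some 1) none)).map
        (fun p => if p.1 == "o" && p.2 == "o" then (1:Int) else 0)).sum)).sum
  let anti : Int :=
    ((grid.zip (PySem.List.slice grid (some 1) none)).map (fun rr =>
      (((PySem.List.slice rr.1 (some 1) none).zip rr.2).map
        (fun p => if p.1 == "o" && p.2 == "o" then (1:Int) else 0)).sum)).sum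
  horiz + vert + diag + anti

-- ===== PRECONDITION & SPEC =====
-- Pre_ excludes exactly the inputs on which the Python A raises IndexError:
-- when R > 0 and S > 0, A reads arr[r][c] for every r < R, c < S, so it needs
-- R ≤ len(arr) and every one of the first R rows to have length ≥ S.
def Pre_count_handshakes (arr : List (List String)) (R : Int) (S : Int) : Prop :=
  R ≤ 0 ∨ S ≤ 0 ∨ (R ≤ (arr.length : Int) ∧ ∀ row ∈ arr.take R.toNat, S ≤ (row.length : Int))
instance (arr : List (List String)) (R : Int) (S : Int) : Decidable (Pre_count_handshakes arr R S) := by unfold Pre_count_handshakes; infer_instance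

def pvWitness_count_handshakes : List (List String) × Int × Int :=
  ([["o", "o"], [".", "o"]], 2, 2)

def Spec_count_handshakes (arr : List (List String)) (R : Int) (S : Int) (out : Int) : Prop := out = count_handshakes_alt arr R S
instance (arr : List (List String)) (R : Int) (S : Int) (out : Int) : Decidable (Spec_count_handshakes arr R S out) := by unfold Spec_count_handshakes; infer_instance

-- ===== CLAIM (what is proved, stated in full; the proofs are below) =====
def Claim_equal_count_handshakes : Prop := ∀ (arr : List (List String)) (R : Int) (S : Int), Dom_count_handshakes arr R S → Pre_count_handshakes arr R S → Spec_count_handshakes arr R S (count_handshakes arr R S)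

-- ===== LEMMAS AND PROOFS =====

-- the cell predicate both ports test
def pvO (arr : List (List String)) (r c : Int) : Bool :=
  PySem.List.pyGetD (PySem.List.pyGetD arr r []) c "" == "o"

-- the index box [0,R) × [0,S)
noncomputable def pvBox (R S : Int) : Finset (Int × Int) := Finset.Ico 0 R ×ˢ Finset.Ico 0 S

-- number of ordered adjacent 'o'-pairs in direction (dr,dc), both endpoints inside the box
noncomputable def pvT (o : Int → Int → Bool) (R S dr dc : Int) : Int :=
  ∑ p ∈ pvBox R S,
    (if o p.1 p.2 = true ∧ (p.1 + dr, p.2 + dc) ∈ pvBox R S ∧ o (p.1 + dr) (p.2 + dc) = true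
     then (1:Int) else 0)

theorem pvT_filter (o : Int → Int → Bool) (R S dr dc : Int) :
    pvT o R S dr dc
      = ∑ p ∈ (pvBox R S).filter (fun p => (p.1 + dr, p.2 + dc) ∈ pvBox R S),
          (if o p.1 p.2 = true ∧ o (p.1 + dr) (p.2 + dc) = true then (1:Int) else 0) := by
  unfold pvT
  rw [Finset.sum_filter]
  refine Finset.sum_congr rfl fun p _ => ?_
  by_cases hm : (p.1 + dr, p.2 + dc) ∈ pvBox R S
  · simp only [hm, if_true, true_and]
  · simp only [hm, if_false, false_and, and_false]

theorem pvT_symm (o : Int → Int → Bool) (R S dr dc : Int) :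
    pvT o R S dr dc = pvT o R S (-dr) (-dc) := by
  rw [pvT_filter, pvT_filter]
  refine Finset.sum_nbij' (fun p => (p.1 + dr, p.2 + dc)) (fun q => (q.1 + -dr, q.2 + -dc))
    ?_ ?_ ?_ ?_ ?_
  · intro a ha
    obtain ⟨x, y⟩ := a
    simp only [Finset.mem_filter, pvBox, Finset.mem_product, Finset.mem_Ico] at ha ⊢
    omega
  · intro a ha
    obtain ⟨x, y⟩ := a
    simp only [Finset.mem_filter, pvBox, Finset.mem_product, Finset.mem_Ico] at ha ⊢
    omega
  · intro a _
    obtain ⟨x, y⟩ := a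
    simp only [Prod.mk.injEq]
    constructor <;> ring
  · intro a _
    obtain ⟨x, y⟩ := a
    simp only [Prod.mk.injEq]
    constructor <;> ring
  · intro a _
    obtain ⟨x, y⟩ := a
    have e1 : x + dr + -dr = x := by ring
    have e2 : y + dc + -dc = y := by ring
    simp only [e1, e2]
    exact if_congr (Iff.intro (fun h => ⟨h.2, h.1⟩) (fun h => ⟨h.2, h.1⟩)) rfl rfl

-- list-sum over range(n) as a Finset sum
theorem pvSum_range (n : Nat) (f : Nat → Int) :
    ((List.range n).map f).sum = ∑ i ∈ Finset.range n, f i := by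
  induction n with
  | zero => simp
  | succ m ih => rw [List.range_succ, Finset.sum_range_succ, List.map_append, List.sum_append, ih]; simp

-- list-sum over a Python range(a,b) as a Finset sum over Ico a b
theorem pvSum_pyRange (a b : Int) (f : Int → Int) :
    ((PySem.List.pyRange a b 1).map f).sum = ∑ x ∈ Finset.Ico a b, f x := by
  rw [PySem.List.pyRange_one a b, List.map_map, pvSum_range]
  refine Finset.sum_nbij' (fun k => a + (k : Int)) (fun x => (x - a).toNat) ?_ ?_ ?_ ?_ ?_
  · intro k hk; simp only [Finset.mem_range] at hk; simp only [Finset.mem_Ico]; omega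
  · intro x hx; simp only [Finset.mem_Ico] at hx; simp only [Finset.mem_range]; omega
  · intro k hk; simp only [Finset.mem_range] at hk
    show ((a + (k : Int)) - a).toNat = k; omega
  · intro x hx; simp only [Finset.mem_Ico] at hx
    show a + (((x - a).toNat : Nat) : Int) = x; omega
  · intro k _; rfl

-- a counting fold is the accumulator plus a 0/1 indicator sum
theorem pvFoldl_count {α : Type} (l : List α) (p : α → Prop) [DecidablePred p] (h : Int) :
    l.foldl (fun h dd => if p dd then h + 1 else h) h
      = h + (l.map fun dd => if p dd then (1:Int) else 0).sum := by
  induction l generalizing h with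
  | nil => simp
  | cons x xs ih =>
    simp only [List.foldl_cons, List.map_cons, List.sum_cons, ih]
    split_ifs <;> ring

-- a guarded accumulating fold is the accumulator plus a guarded sum
theorem pvFoldl_if_acc (l : List Int) (g : Int → Int) (p : Int → Prop) [DecidablePred p] (h : Int) :
    l.foldl (fun h c => if p c then h + g c else h) h
      = h + (l.map fun c => if p c then g c else 0).sum := by
  induction l generalizing h with
  | nil => simp
  | cons x xs ih =>
    simp only [List.foldl_cons, List.map_cons, List.sum_cons, ih]
    split_ifs <;> ring

theorem pvSum_if_const {P : Prop} [Decidable P] (s : Finset Int) (f : Int → Int) :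
    (∑ c ∈ s, if P then f c else 0) = if P then (∑ c ∈ s, f c) else 0 := by
  split_ifs <;> simp

theorem pvSum_Ico_shrink (a b a' b' : Int) (f : Int → Int) (h1 : a ≤ a') (h2 : b' ≤ b) :
    (∑ c ∈ Finset.Ico a b, if a' ≤ c ∧ c < b' then f c else 0) = ∑ c ∈ Finset.Ico a' b', f c := by
  rw [← Finset.sum_filter]
  refine Finset.sum_congr ?_ (fun _ _ => rfl)
  ext x
  simp only [Finset.mem_filter, Finset.mem_Ico]
  omega

theorem pvT_double (o : Int → Int → Bool) (R S dr dc : Int) :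
    pvT o R S dr dc
      = ∑ r ∈ Finset.Ico 0 R, ∑ c ∈ Finset.Ico 0 S,
          (if o r c = true ∧ (0 ≤ r + dr ∧ r + dr < R ∧ 0 ≤ c + dc ∧ c + dc < S) ∧
              o (r + dr) (c + dc) = true then (1:Int) else 0) := by
  unfold pvT
  rw [show pvBox R S = Finset.Ico 0 R ×ˢ Finset.Ico 0 S from rfl, Finset.sum_product]
  refine Finset.sum_congr rfl fun r _ => Finset.sum_congr rfl fun c _ => ?_
  refine if_congr ?_ rfl rfl
  simp only [Finset.mem_product, Finset.mem_Ico]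
  tauto

theorem pvT01 (o : Int → Int → Bool) (R S : Int) :
    pvT o R S 0 1
      = ∑ r ∈ Finset.Ico 0 R, ∑ c ∈ Finset.Ico 0 (S-1),
          (if o r c && o r (c+1) then (1:Int) else 0) := by
  rw [pvT_double]
  refine Finset.sum_congr rfl fun r hr => ?_
  simp only [Finset.mem_Ico] at hr
  rw [← pvSum_Ico_shrink 0 S 0 (S-1) (fun c => if o r c && o r (c+1) then (1:Int) else 0)
        (le_refl 0) (by omega)]
  refine Finset.sum_congr rfl fun c hc => ?_
  simp only [Finset.mem_Ico] at hc
  simp only [add_zero, Bool.and_eq_true]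
  split_ifs <;> simp_all <;> omega

theorem pvT10 (o : Int → Int → Bool) (R S : Int) :
    pvT o R S 1 0
      = ∑ r ∈ Finset.Ico 0 (R-1), ∑ c ∈ Finset.Ico 0 S,
          (if o r c && o (r+1) c then (1:Int) else 0) := by
  rw [pvT_double]
  rw [← pvSum_Ico_shrink 0 R 0 (R-1)
        (fun r => ∑ c ∈ Finset.Ico 0 S, if o r c && o (r+1) c then (1:Int) else 0)
        (le_refl 0) (by omega)]
  refine Finset.sum_congr rfl fun r hr => ?_
  simp only [Finset.mem_Ico] at hr
  rw [← pvSum_if_const]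
  refine Finset.sum_congr rfl fun c hc => ?_
  simp only [Finset.mem_Ico] at hc
  simp only [add_zero, Bool.and_eq_true]
  split_ifs <;> simp_all <;> omega

theorem pvT11 (o : Int → Int → Bool) (R S : Int) :
    pvT o R S 1 1
      = ∑ r ∈ Finset.Ico 0 (R-1), ∑ c ∈ Finset.Ico 0 (S-1),
          (if o r c && o (r+1) (c+1) then (1:Int) else 0) := by
  rw [pvT_double]
  rw [← pvSum_Ico_shrink 0 R 0 (R-1)
        (fun r => ∑ c ∈ Finset.Ico 0 (S-1), if o r c && o (r+1) (c+1) then (1:Int) else 0)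
        (le_refl 0) (by omega)]
  refine Finset.sum_congr rfl fun r hr => ?_
  simp only [Finset.mem_Ico] at hr
  rw [← pvSum_Ico_shrink 0 S 0 (S-1) (fun c => if o r c && o (r+1) (c+1) then (1:Int) else 0)
        (le_refl 0) (by omega), ← pvSum_if_const]
  refine Finset.sum_congr rfl fun c hc => ?_
  simp only [Finset.mem_Ico] at hc
  simp only [Bool.and_eq_true]
  split_ifs <;> simp_all <;> omega

theorem pvT1m1 (o : Int → Int → Bool) (R S : Int) :
    pvT o R S 1 (-1)
      = ∑ r ∈ Finset.Ico 0 (R-1), ∑ c ∈ Finset.Ico 1 S,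
          (if o r c && o (r+1) (c-1) then (1:Int) else 0) := by
  rw [pvT_double]
  rw [← pvSum_Ico_shrink 0 R 0 (R-1)
        (fun r => ∑ c ∈ Finset.Ico 1 S, if o r c && o (r+1) (c-1) then (1:Int) else 0)
        (le_refl 0) (by omega)]
  refine Finset.sum_congr rfl fun r hr => ?_
  simp only [Finset.mem_Ico] at hr
  rw [← pvSum_Ico_shrink 0 S 1 S (fun c => if o r c && o (r+1) (c-1) then (1:Int) else 0)
        (by omega) (le_refl S), ← pvSum_if_const]
  refine Finset.sum_congr rfl fun c hc => ?_
  simp only [Finset.mem_Ico] at hc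
  simp only [Bool.and_eq_true, show ∀ x : Int, x + -1 = x - 1 from fun x => by ring]
  split_ifs <;> simp_all <;> omega

theorem pvA_char (arr : List (List String)) (R S : Int) :
    count_handshakes arr R S
      = PySem.Int.floordiv
          (pvT (pvO arr) R S (-1) (-1) + pvT (pvO arr) R S (-1) 0 + pvT (pvO arr) R S (-1) 1
            + pvT (pvO arr) R S 0 (-1) + pvT (pvO arr) R S 0 1
            + pvT (pvO arr) R S 1 (-1) + pvT (pvO arr) R S 1 0 + pvT (pvO arr) R S 1 1) 2 := by
  simp only [count_handshakes]
  simp only [pvFoldl_count]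
  simp only [pvFoldl_if_acc]
  simp only [PySem.List.foldl_add]
  simp only [List.map_cons, List.map_nil, List.sum_cons, List.sum_nil, add_zero, zero_add]
  simp only [pvSum_pyRange]
  congr 1
  rw [pvT_double (pvO arr) R S (-1) (-1), pvT_double (pvO arr) R S (-1) 0,
      pvT_double (pvO arr) R S (-1) 1, pvT_double (pvO arr) R S 0 (-1),
      pvT_double (pvO arr) R S 0 1, pvT_double (pvO arr) R S 1 (-1),
      pvT_double (pvO arr) R S 1 0, pvT_double (pvO arr) R S 1 1]
  simp only [pvO]
  simp only [add_zero]
  simp only [← Finset.sum_add_distrib]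
  refine Finset.sum_congr rfl fun r _ => ?_
  refine Finset.sum_congr rfl fun c _ => ?_
  by_cases ho : (PySem.List.pyGetD (PySem.List.pyGetD arr r []) c "" == "o") = true
  · simp only [ho, if_true, true_and]
    ring
  · simp only [ho]
    simp

def pvGrid (arr : List (List String)) (R S : Int) : List (List String) :=
  (arr.take (max 0 R).toNat).map (fun row => row.take (max 0 S).toNat)

theorem pvGrid_eq (arr : List (List String)) (R S : Int) :
    (PySem.List.slice arr none (some (max 0 R))).map
      (fun row => PySem.List.slice row none (some (max 0 S))) = pvGrid arr R S := by
  rw [pvGrid,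
    show PySem.List.slice arr none (some (max 0 R)) = arr.take (max 0 R).toNat from
      PySem.List.slice_to arr (le_max_left 0 R)]
  refine List.map_congr_left fun row _ => ?_
  exact PySem.List.slice_to row (le_max_left 0 S)

theorem pvMapSumIdx {α : Type} (l : List α) (d : α) (g : α → Int) :
    (l.map g).sum = ∑ i ∈ Finset.range l.length, g (l.getD i d) := by
  induction l with
  | nil => simp
  | cons x xs ih =>
    rw [List.map_cons, List.sum_cons, List.length_cons, Finset.sum_range_succ', ih]
    simp only [List.getD_cons_succ, List.getD_cons_zero]
    ring

theorem pvZipSum {α β : Type} (a : List α) (b : List β) (da : α) (db : β) (f : α × β → Int) :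
    ((a.zip b).map f).sum
      = ∑ i ∈ Finset.range (min a.length b.length), f (a.getD i da, b.getD i db) := by
  induction a generalizing b with
  | nil => simp
  | cons x xs ih =>
    cases b with
    | nil => simp
    | cons y ys =>
      rw [List.zip_cons_cons, List.map_cons, List.sum_cons, ih ys,
          List.length_cons, List.length_cons, Nat.succ_min_succ, Finset.sum_range_succ']
      simp only [List.getD_cons_succ, List.getD_cons_zero]
      ring

theorem pvSum_range_cast (n : Nat) (f : Int → Int) :
    (∑ i ∈ Finset.range n, f (i : Int)) = ∑ x ∈ Finset.Ico (0:Int) (n:Int), f x := by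
  refine Finset.sum_nbij' (fun k => (k : Int)) (fun x => x.toNat) ?_ ?_ ?_ ?_ ?_
  · intro k hk; simp only [Finset.mem_range] at hk; simp only [Finset.mem_Ico]; omega
  · intro x hx; simp only [Finset.mem_Ico] at hx; simp only [Finset.mem_range]; omega
  · intro k hk; simp only [Finset.mem_range] at hk
    show ((k : Int)).toNat = k; omega
  · intro x hx; simp only [Finset.mem_Ico] at hx
    show ((x.toNat : Nat) : Int) = x; omega
  · intro k _; rfl

theorem pvIcoNat (b : Int) (f : Int → Int) :
    (∑ x ∈ Finset.Ico (0:Int) b, f x) = ∑ i ∈ Finset.range b.toNat, f (i : Int) := by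
  rw [pvSum_range_cast]
  by_cases hb : 0 ≤ b
  · rw [Int.toNat_of_nonneg hb]
  · rw [Finset.Ico_eq_empty (by omega), Finset.Ico_eq_empty (by simp; omega)]

theorem pvSum_Ico_one (b : Int) (f : Int → Int) :
    (∑ x ∈ Finset.Ico (1:Int) b, f x) = ∑ i ∈ Finset.range (b-1).toNat, f ((i : Int) + 1) := by
  refine Finset.sum_nbij' (fun x => (x - 1).toNat) (fun i => (i : Int) + 1) ?_ ?_ ?_ ?_ ?_
  · intro x hx; simp only [Finset.mem_Ico] at hx; simp only [Finset.mem_range]; omega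
  · intro i hi; simp only [Finset.mem_range] at hi; simp only [Finset.mem_Ico]; omega
  · intro x hx; simp only [Finset.mem_Ico] at hx
    show (((x - 1).toNat : Int) + 1) = x; omega
  · intro i hi; simp only [Finset.mem_range] at hi
    show (((i : Int) + 1) - 1).toNat = i; omega
  · intro x hx; simp only [Finset.mem_Ico] at hx
    rw [show (((x - 1).toNat : Int) + 1) = x from by omega]

theorem pvSum_range_extend (n n' : Nat) (f : Nat → Int) (h : n ≤ n')
    (h0 : ∀ i, n ≤ i → i < n' → f i = 0) :
    (∑ i ∈ Finset.range n, f i) = ∑ i ∈ Finset.range n', f i := by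
  refine Finset.sum_subset ?_ fun x hx hnx => ?_
  · intro x hx; simp only [Finset.mem_range] at hx ⊢; omega
  · exact h0 x (by simpa using hnx) (by simpa using hx)

theorem pvGetD_map {α β : Type} (l : List α) (f : α → β) (i : Nat) (h : i < l.length)
    (d : β) (d' : α) : (l.map f).getD i d = f (l.getD i d') := by
  have h1 : l[i]? = some l[i] := List.getElem?_eq_getElem h
  simp [List.getD_eq_getElem?_getD, List.getElem?_map, h1]

theorem pvGetD_take {α : Type} (l : List α) (k i : Nat) (h : i < k) (d : α) :
    (l.take k).getD i d = l.getD i d := by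
  simp [List.getD_eq_getElem?_getD, h]

theorem pvGetD_drop {α : Type} (l : List α) (n i : Nat) (d : α) :
    (l.drop n).getD i d = l.getD (n + i) d := by
  simp [List.getD_eq_getElem?_getD, List.getElem?_drop]

theorem pvGetD_len_le {α : Type} (l : List α) (i : Nat) (d : α) (h : l.length ≤ i) :
    l.getD i d = d := by
  simp [List.getD_eq_getElem?_getD, List.getElem?_eq_none (by omega : l.length ≤ i)]

theorem pvO_nat (arr : List (List String)) (r c : Nat) :
    pvO arr (r : Int) (c : Int) = ((arr.getD r []).getD c "" == "o") := by
  simp [pvO, PySem.List.pyGetD_natCast]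

theorem pvGrid_len (arr : List (List String)) (R S : Int) :
    (pvGrid arr R S).length = min (max 0 R).toNat arr.length := by
  simp [pvGrid]

theorem pvGrid_getD (arr : List (List String)) (R S : Int) (j : Nat)
    (h : j < (pvGrid arr R S).length) :
    (pvGrid arr R S).getD j [] = (arr.getD j []).take (max 0 S).toNat := by
  rw [pvGrid] at h ⊢
  rw [pvGetD_map _ _ _ (by simpa using h) [] []]
  congr 1
  exact pvGetD_take _ _ _ (by simp at h; omega) _

theorem pvO_row_oob (arr : List (List String)) (j : Nat) (h : arr.length ≤ j) (c : Int) :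
    pvO arr (j : Int) c = false := by
  unfold pvO
  rw [PySem.List.pyGetD_natCast, pvGetD_len_le _ _ _ h]
  have h2 : PySem.List.pyGetD ([] : List String) c "" = "" := by
    simp [PySem.List.pyGetD, PySem.List.pyGet?, PySem.List.pyIdx?]
  rw [h2]
  rfl

theorem pvBeqEmpty : (("" : String) == "o") = false := rfl

theorem pvPass_horiz (arr : List (List String)) (R S : Int) :
    ((pvGrid arr R S).map (fun row =>
      ((row.zip (row.drop 1)).map
        (fun p => if p.1 == "o" && p.2 == "o" then (1:Int) else 0)).sum)).sum
      = ∑ r ∈ Finset.Ico 0 R, ∑ c ∈ Finset.Ico 0 (S-1),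
          (if pvO arr r c && pvO arr r (c+1) then (1:Int) else 0) := by
  rw [pvMapSumIdx _ ([] : List String)]
  have hz : ∀ row : List String,
      ((row.zip (row.drop 1)).map
        (fun p => if p.1 == "o" && p.2 == "o" then (1:Int) else 0)).sum
      = ∑ i ∈ Finset.range (min row.length (row.drop 1).length),
          (if row.getD i "" == "o" && (row.drop 1).getD i "" == "o" then (1:Int) else 0) :=
    fun row => pvZipSum row (row.drop 1) "" "" _
  simp only [hz, List.length_drop]
  simp only [show ∀ L : Nat, min L (L - 1) = L - 1 from fun L => by omega]
  simp only [pvIcoNat]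
  rw [pvSum_range_extend _ R.toNat _ (by rw [pvGrid_len]; omega)
        (by intro j hj1 _; rw [pvGetD_len_le _ _ _ hj1]; simp)]
  refine Finset.sum_congr rfl fun j hj => ?_
  simp only [Finset.mem_range] at hj
  by_cases hjg : j < (pvGrid arr R S).length
  · rw [pvGrid_getD arr R S j hjg]
    have hrl : ((arr.getD j []).take (max 0 S).toNat).length ≤ (max 0 S).toNat := by
      simp
    rw [pvSum_range_extend (((arr.getD j []).take (max 0 S).toNat).length - 1) (S-1).toNat _
          (by omega)
          (by intro i hi1 _
              rw [pvGetD_drop,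
                  pvGetD_len_le ((arr.getD j []).take (max 0 S).toNat) (1+i) "" (by omega)]
              simp [pvBeqEmpty])]
    refine Finset.sum_congr rfl fun i hi => ?_
    simp only [Finset.mem_range] at hi
    rw [pvGetD_drop, pvGetD_take _ _ _ (by omega), pvGetD_take _ _ _ (by omega)]
    rw [show ((i : Int) + 1) = (((i + 1 : Nat) : Int)) from by push_cast; ring]
    rw [pvO_nat, pvO_nat, show 1 + i = i + 1 from by omega]
  · rw [pvGetD_len_le _ _ _ (by omega)]
    have hlen : arr.length ≤ j := by rw [pvGrid_len] at hjg; omega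
    have hfalse : ∀ c : Int, pvO arr (j : Int) c = false := pvO_row_oob arr j hlen
    simp [hfalse]

theorem pvPass_vert (arr : List (List String)) (R S : Int) :
    (((pvGrid arr R S).zip ((pvGrid arr R S).drop 1)).map (fun rr =>
      ((rr.1.zip rr.2).map
        (fun p => if p.1 == "o" && p.2 == "o" then (1:Int) else 0)).sum)).sum
      = ∑ r ∈ Finset.Ico 0 (R-1), ∑ c ∈ Finset.Ico 0 S,
          (if pvO arr r c && pvO arr (r+1) c then (1:Int) else 0) := by
  rw [pvZipSum (pvGrid arr R S) ((pvGrid arr R S).drop 1) [] [] _]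
  simp only [List.length_drop]
  simp only [show ∀ L : Nat, min L (L - 1) = L - 1 from fun L => by omega]
  simp only [pvGetD_drop]
  have hz : ∀ r1 r2 : List String,
      ((r1.zip r2).map
        (fun p => if p.1 == "o" && p.2 == "o" then (1:Int) else 0)).sum
      = ∑ i ∈ Finset.range (min r1.length r2.length),
          (if r1.getD i "" == "o" && r2.getD i "" == "o" then (1:Int) else 0) :=
    fun r1 r2 => pvZipSum r1 r2 "" "" _
  simp only [hz]
  simp only [pvIcoNat]
  rw [pvSum_range_extend ((pvGrid arr R S).length - 1) (R-1).toNat _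
        (by rw [pvGrid_len]; omega)
        (by intro j hj1 _
            rw [pvGetD_len_le (pvGrid arr R S) (1+j) [] (by omega)]
            simp)]
  refine Finset.sum_congr rfl fun j hj => ?_
  simp only [Finset.mem_range] at hj
  by_cases hjg : 1 + j < (pvGrid arr R S).length
  · rw [pvGrid_getD arr R S j (by omega), pvGrid_getD arr R S (1+j) hjg]
    have h1 : ((arr.getD j []).take (max 0 S).toNat).length ≤ (max 0 S).toNat := by simp
    have h2 : ((arr.getD (1+j) []).take (max 0 S).toNat).length ≤ (max 0 S).toNat := by simp
    rw [pvSum_range_extend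
          (min ((arr.getD j []).take (max 0 S).toNat).length
               ((arr.getD (1+j) []).take (max 0 S).toNat).length) S.toNat _ (by omega)
          (by intro i hi1 _
              by_cases hc : ((arr.getD j []).take (max 0 S).toNat).length ≤ i
              · rw [pvGetD_len_le ((arr.getD j []).take (max 0 S).toNat) i "" hc]
                simp [pvBeqEmpty]
              · rw [pvGetD_len_le ((arr.getD (1+j) []).take (max 0 S).toNat) i "" (by omega)]
                simp [pvBeqEmpty])]
    refine Finset.sum_congr rfl fun i hi => ?_
    simp only [Finset.mem_range] at hi
    rw [pvGetD_take _ _ _ (by omega), pvGetD_take _ _ _ (by omega)]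
    rw [show ((j : Int) + 1) = (((1 + j : Nat) : Int)) from by push_cast; ring]
    rw [pvO_nat, pvO_nat]
  · rw [pvGetD_len_le (pvGrid arr R S) (1+j) [] (by omega)]
    have hlen : arr.length ≤ 1 + j := by rw [pvGrid_len] at hjg; omega
    have hfalse : ∀ c : Int, pvO arr ((j:Int)+1) c = false := by
      intro c
      rw [show ((j : Int) + 1) = (((1 + j : Nat) : Int)) from by push_cast; ring]
      exact pvO_row_oob arr (1+j) hlen c
    simp [hfalse]

theorem pvPass_diag (arr : List (List String)) (R S : Int) :
    (((pvGrid arr R S).zip ((pvGrid arr R S).drop 1)).map (fun rr =>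
      ((rr.1.zip (rr.2.drop 1)).map
        (fun p => if p.1 == "o" && p.2 == "o" then (1:Int) else 0)).sum)).sum
      = ∑ r ∈ Finset.Ico 0 (R-1), ∑ c ∈ Finset.Ico 0 (S-1),
          (if pvO arr r c && pvO arr (r+1) (c+1) then (1:Int) else 0) := by
  rw [pvZipSum (pvGrid arr R S) ((pvGrid arr R S).drop 1) [] [] _]
  simp only [List.length_drop]
  simp only [show ∀ L : Nat, min L (L - 1) = L - 1 from fun L => by omega]
  simp only [pvGetD_drop]
  have hz : ∀ r1 r2 : List String,
      ((r1.zip (r2.drop 1)).map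
        (fun p => if p.1 == "o" && p.2 == "o" then (1:Int) else 0)).sum
      = ∑ i ∈ Finset.range (min r1.length (r2.drop 1).length),
          (if r1.getD i "" == "o" && (r2.drop 1).getD i "" == "o" then (1:Int) else 0) :=
    fun r1 r2 => pvZipSum r1 (r2.drop 1) "" "" _
  simp only [hz, List.length_drop]
  simp only [pvGetD_drop]
  simp only [pvIcoNat]
  rw [pvSum_range_extend ((pvGrid arr R S).length - 1) (R-1).toNat _
        (by rw [pvGrid_len]; omega)
        (by intro j hj1 _
            rw [pvGetD_len_le (pvGrid arr R S) (1+j) [] (by omega)]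
            simp)]
  refine Finset.sum_congr rfl fun j hj => ?_
  simp only [Finset.mem_range] at hj
  by_cases hjg : 1 + j < (pvGrid arr R S).length
  · rw [pvGrid_getD arr R S j (by omega), pvGrid_getD arr R S (1+j) hjg]
    have h1 : ((arr.getD j []).take (max 0 S).toNat).length ≤ (max 0 S).toNat := by simp
    have h2 : ((arr.getD (1+j) []).take (max 0 S).toNat).length ≤ (max 0 S).toNat := by simp
    rw [pvSum_range_extend
          (min ((arr.getD j []).take (max 0 S).toNat).length
               (((arr.getD (1+j) []).take (max 0 S).toNat).length - 1)) (S-1).toNat _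
          (by omega)
          (by intro i hi1 _
              by_cases hc : ((arr.getD j []).take (max 0 S).toNat).length ≤ i
              · rw [pvGetD_len_le ((arr.getD j []).take (max 0 S).toNat) i "" hc]
                simp [pvBeqEmpty]
              · rw [pvGetD_len_le ((arr.getD (1+j) []).take (max 0 S).toNat) (1+i) "" (by omega)]
                simp [pvBeqEmpty])]
    refine Finset.sum_congr rfl fun i hi => ?_
    simp only [Finset.mem_range] at hi
    rw [pvGetD_take _ _ _ (by omega), pvGetD_take _ _ _ (by omega)]
    rw [show ((j : Int) + 1) = (((1 + j : Nat) : Int)) from by push_cast; ring,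
        show ((i : Int) + 1) = (((1 + i : Nat) : Int)) from by push_cast; ring]
    rw [pvO_nat, pvO_nat]
  · rw [pvGetD_len_le (pvGrid arr R S) (1+j) [] (by omega)]
    have hlen : arr.length ≤ 1 + j := by rw [pvGrid_len] at hjg; omega
    have hfalse : ∀ c : Int, pvO arr ((j:Int)+1) c = false := by
      intro c
      rw [show ((j : Int) + 1) = (((1 + j : Nat) : Int)) from by push_cast; ring]
      exact pvO_row_oob arr (1+j) hlen c
    simp [hfalse]

theorem pvPass_anti (arr : List (List String)) (R S : Int) :
    (((pvGrid arr R S).zip ((pvGrid arr R S).drop 1)).map (fun rr =>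
      (((rr.1.drop 1).zip rr.2).map
        (fun p => if p.1 == "o" && p.2 == "o" then (1:Int) else 0)).sum)).sum
      = ∑ r ∈ Finset.Ico 0 (R-1), ∑ c ∈ Finset.Ico 1 S,
          (if pvO arr r c && pvO arr (r+1) (c-1) then (1:Int) else 0) := by
  rw [pvZipSum (pvGrid arr R S) ((pvGrid arr R S).drop 1) [] [] _]
  simp only [List.length_drop]
  simp only [show ∀ L : Nat, min L (L - 1) = L - 1 from fun L => by omega]
  simp only [pvGetD_drop]
  have hz : ∀ r1 r2 : List String,
      (((r1.drop 1).zip r2).map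
        (fun p => if p.1 == "o" && p.2 == "o" then (1:Int) else 0)).sum
      = ∑ i ∈ Finset.range (min (r1.drop 1).length r2.length),
          (if (r1.drop 1).getD i "" == "o" && r2.getD i "" == "o" then (1:Int) else 0) :=
    fun r1 r2 => pvZipSum (r1.drop 1) r2 "" "" _
  simp only [hz, List.length_drop]
  simp only [pvGetD_drop]
  simp only [pvIcoNat, pvSum_Ico_one]
  simp only [add_sub_cancel_right]
  rw [pvSum_range_extend ((pvGrid arr R S).length - 1) (R-1).toNat _
        (by rw [pvGrid_len]; omega)
        (by intro j hj1 _
            rw [pvGetD_len_le (pvGrid arr R S) (1+j) [] (by omega)]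
            simp)]
  refine Finset.sum_congr rfl fun j hj => ?_
  simp only [Finset.mem_range] at hj
  by_cases hjg : 1 + j < (pvGrid arr R S).length
  · rw [pvGrid_getD arr R S j (by omega), pvGrid_getD arr R S (1+j) hjg]
    have h1 : ((arr.getD j []).take (max 0 S).toNat).length ≤ (max 0 S).toNat := by simp
    have h2 : ((arr.getD (1+j) []).take (max 0 S).toNat).length ≤ (max 0 S).toNat := by simp
    rw [pvSum_range_extend
          (min (((arr.getD j []).take (max 0 S).toNat).length - 1)
               ((arr.getD (1+j) []).take (max 0 S).toNat).length) (S-1).toNat _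
          (by omega)
          (by intro i hi1 _
              by_cases hc : ((arr.getD j []).take (max 0 S).toNat).length ≤ 1 + i
              · rw [pvGetD_len_le ((arr.getD j []).take (max 0 S).toNat) (1+i) "" hc]
                simp [pvBeqEmpty]
              · rw [pvGetD_len_le ((arr.getD (1+j) []).take (max 0 S).toNat) i "" (by omega)]
                simp [pvBeqEmpty])]
    refine Finset.sum_congr rfl fun i hi => ?_
    simp only [Finset.mem_range] at hi
    rw [pvGetD_take _ _ _ (by omega), pvGetD_take _ _ _ (by omega)]
    rw [show ((j : Int) + 1) = (((1 + j : Nat) : Int)) from by push_cast; ring,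
        show ((i : Int) + 1) = (((1 + i : Nat) : Int)) from by push_cast; ring]
    rw [pvO_nat, pvO_nat]
  · rw [pvGetD_len_le (pvGrid arr R S) (1+j) [] (by omega)]
    have hlen : arr.length ≤ 1 + j := by rw [pvGrid_len] at hjg; omega
    have hfalse : ∀ c : Int, pvO arr ((j:Int)+1) c = false := by
      intro c
      rw [show ((j : Int) + 1) = (((1 + j : Nat) : Int)) from by push_cast; ring]
      exact pvO_row_oob arr (1+j) hlen c
    simp [hfalse]

theorem pvB_char (arr : List (List String)) (R S : Int) :
    count_handshakes_alt arr R S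
      = pvT (pvO arr) R S 0 1 + pvT (pvO arr) R S 1 0
          + pvT (pvO arr) R S 1 1 + pvT (pvO arr) R S 1 (-1) := by
  simp only [count_handshakes_alt]
  rw [pvGrid_eq]
  simp only [PySem.List.slice_from_one, ← List.drop_one]
  rw [pvT01, pvT10, pvT11, pvT1m1, ← pvPass_horiz arr R S, ← pvPass_vert arr R S,
      ← pvPass_diag arr R S, ← pvPass_anti arr R S]

-- ===== VERDICT (by name: the statement is the Claim_ definition above) =====
theorem count_handshakes_spec : Claim_equal_count_handshakes := by
  intro arr R S _ _
  unfold Spec_count_handshakes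
  rw [pvA_char, pvB_char]
  rw [pvT_symm (pvO arr) R S (-1) (-1), pvT_symm (pvO arr) R S (-1) 0,
      pvT_symm (pvO arr) R S (-1) 1, pvT_symm (pvO arr) R S 0 (-1)]
  norm_num
  rw [show pvT (pvO arr) R S 1 1 + pvT (pvO arr) R S 1 0 + pvT (pvO arr) R S 1 (-1)
        + pvT (pvO arr) R S 0 1 + pvT (pvO arr) R S 0 1 + pvT (pvO arr) R S 1 (-1)
        + pvT (pvO arr) R S 1 0 + pvT (pvO arr) R S 1 1
      = 2 * (pvT (pvO arr) R S 0 1 + pvT (pvO arr) R S 1 0 + pvT (pvO arr) R S 1 1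
        + pvT (pvO arr) R S 1 (-1)) from by ring]
  simp
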